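-- pv_equiv track=rewrite | github.com/jensbogen/info132 | big018_hovedoppg03 (1).py | check
-- ===== SOURCE A (Python) =====
-- def check(noe): #check() sjekker om det er noen muligheter igjen for å vinne for brukeren.
--     antall = 0
--
--     for a in noe:
--         if a == None:
--             continue
--
--         for b in noe:
--             if b == None:
--                 continue
--
--             elif a[1] == b[1] and a != b:
--                 antall+=1
--
--     if antall > 0:
--         return True
--     else:
--         return False
-- ===== SOURCE B (Python) =====
-- def check(noe):
--     seen = {}
--     for x in noe:
--         if x is None:
--             continue
--         k = x[1]
--         if k in seen:
--             if seen[k] != x: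
--                 return True
--         else:
--             seen[k] = x
--     return False
-- ===== Notes on version B (the rewrite author's own statement) =====
-- stated objective: faster
-- what changed: Replaced the O(n^2) all-pairs nested scan with a single pass that groups elements by their second field in a dict and returns True as soon as two distinct elements share that field.
import Mathlib
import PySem

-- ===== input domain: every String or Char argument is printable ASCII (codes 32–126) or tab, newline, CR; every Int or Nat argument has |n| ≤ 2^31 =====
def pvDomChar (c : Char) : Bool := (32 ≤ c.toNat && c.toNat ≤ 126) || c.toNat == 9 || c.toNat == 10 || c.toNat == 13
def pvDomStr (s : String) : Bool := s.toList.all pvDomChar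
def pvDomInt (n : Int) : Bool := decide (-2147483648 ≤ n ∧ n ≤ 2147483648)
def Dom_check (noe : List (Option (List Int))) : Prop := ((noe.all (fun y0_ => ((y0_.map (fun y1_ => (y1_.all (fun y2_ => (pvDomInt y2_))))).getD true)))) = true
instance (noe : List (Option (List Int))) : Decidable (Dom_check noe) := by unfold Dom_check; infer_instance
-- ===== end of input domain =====

-- B replaces A's O(n^2) all-pairs scan with one pass grouping elements by their
-- second field in a dict; objective: faster (asymptotic).

-- x[1], total under Pre_check (2 ≤ length of every non-None element)
def pvKey (l : List Int) : Int := PySem.List.pyGetD l 1 0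

-- ===== PORT A =====
def check (noe : List (Option (List Int))) : Bool :=
  let antall : Int := noe.foldl (fun acc a =>
    match a with
    | none => acc
    | some av =>
      noe.foldl (fun acc2 b =>
        match b with
        | none => acc2
        | some bv => if pvKey av = pvKey bv ∧ av ≠ bv then acc2 + 1 else acc2) acc) 0
  if antall > 0 then true else false

-- ===== PORT B =====
def checkAltGo (l : List (Option (List Int))) (seen : PySem.Dict Int (List Int)) : Bool :=
  match l with
  | [] => false
  | none :: t => checkAltGo t seen
  | some x :: t =>
    match seen.get? (pvKey x) with
    | some y => if y ≠ x then true else checkAltGo t seen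
    | none => checkAltGo t (seen.insert (pvKey x) x)

def check_alt (noe : List (Option (List Int))) : Bool :=
  checkAltGo noe PySem.Dict.empty

-- ===== PRECONDITION & SPEC =====
-- Pre_check excludes exactly the inputs where Python A raises IndexError on a[1]:
-- some non-None element has fewer than two entries.
def Pre_check (noe : List (Option (List Int))) : Prop :=
  ∀ l ∈ noe.filterMap id, 2 ≤ l.length
instance (noe : List (Option (List Int))) : Decidable (Pre_check noe) := by
  unfold Pre_check; infer_instance

def pvWitness_check : List (Option (List Int)) := [some [1, 2], none, some [3, 2]]

def Spec_check (noe : List (Option (List Int))) (out : Bool) : Prop := out = check_alt noe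
instance (noe : List (Option (List Int))) (out : Bool) : Decidable (Spec_check noe out) := by unfold Spec_check; infer_instance

-- ===== CLAIM (what is proved, stated in full; the proofs are below) =====
def Claim_equal_check : Prop := ∀ (noe : List (Option (List Int))), Dom_check noe → Pre_check noe → Spec_check noe (check noe)

-- ===== LEMMAS AND PROOFS =====

-- "some pair of distinct non-None elements shares its second field"
def pvPair (xs : List (List Int)) : Prop :=
  ∃ a ∈ xs, ∃ b ∈ xs, pvKey a = pvKey b ∧ a ≠ b

-- inner loop of A counts matching partners of av
lemma inner_eq (full : List (Option (List Int))) (av : List Int) :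
    ∀ acc : Int,
      full.foldl (fun acc2 b =>
        match b with
        | none => acc2
        | some bv => if pvKey av = pvKey bv ∧ av ≠ bv then acc2 + 1 else acc2) acc
      = acc + ((full.filterMap id).countP
          (fun bv => decide (pvKey av = pvKey bv ∧ av ≠ bv)) : Int) := by
  induction full with
  | nil => intro acc; simp
  | cons h t ih =>
    intro acc
    cases h with
    | none => simpa using ih acc
    | some bv =>
      simp only [List.foldl_cons]
      rw [ih]
      rw [show List.filterMap id (some bv :: t) = bv :: List.filterMap id t from rfl]
      rw [List.countP_cons]
      by_cases hb : pvKey av = pvKey bv ∧ av ≠ bv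
      · rw [if_pos hb, if_pos (decide_eq_true hb)]
        push_cast
        ring
      · rw [if_neg hb, if_neg (by simp [hb])]
        push_cast
        ring

def pvCnt (full : List (Option (List Int))) (av : List Int) : Nat :=
  (full.filterMap id).countP (fun bv => decide (pvKey av = pvKey bv ∧ av ≠ bv))

lemma outer_eq (full : List (Option (List Int))) :
    ∀ (l : List (Option (List Int))) (acc : Int),
      l.foldl (fun acc a =>
        match a with
        | none => acc
        | some av =>
          full.foldl (fun acc2 b =>
            match b with
            | none => acc2
            | some bv => if pvKey av = pvKey bv ∧ av ≠ bv then acc2 + 1 else acc2) acc) acc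
      = acc + (((l.filterMap id).map (pvCnt full)).sum : Int) := by
  intro l
  induction l with
  | nil => intro acc; simp
  | cons h t ih =>
    intro acc
    cases h with
    | none => simpa using ih acc
    | some av =>
      simp only [List.foldl_cons]
      rw [ih]
      rw [inner_eq]
      rw [show List.filterMap id (some av :: t) = av :: List.filterMap id t from rfl]
      rw [List.map_cons, List.sum_cons]
      simp only [pvCnt]
      push_cast
      ring

lemma check_iff (noe : List (Option (List Int))) :
    check noe = true ↔ pvPair (noe.filterMap id) := by
  unfold check
  rw [outer_eq, zero_add]
  have key : (0 : Int) < (((noe.filterMap id).map (pvCnt noe)).sum : Int) ↔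
      pvPair (noe.filterMap id) := by
    rw [Int.natCast_pos]
    constructor
    · intro hpos
      have hne : ((noe.filterMap id).map (pvCnt noe)).sum ≠ 0 := Nat.pos_iff_ne_zero.mp hpos
      have : ∃ n ∈ (noe.filterMap id).map (pvCnt noe), n ≠ 0 := by
        by_contra hc
        push Not at hc
        exact hne (List.sum_eq_zero hc)
      obtain ⟨n, hn, hn0⟩ := this
      obtain ⟨av, hav, rfl⟩ := List.mem_map.mp hn
      obtain ⟨bv, hbv, hq⟩ := List.countP_pos_iff.mp (Nat.pos_iff_ne_zero.mpr hn0)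
      have hq' : pvKey av = pvKey bv ∧ av ≠ bv := by simpa using hq
      exact ⟨av, hav, bv, hbv, hq'.1, hq'.2⟩
    · rintro ⟨av, hav, bv, hbv, hk, hne⟩
      have hpos : 0 < pvCnt noe av :=
        List.countP_pos_iff.mpr ⟨bv, hbv, by simp [hk, hne]⟩
      exact Nat.lt_of_lt_of_le hpos
        (List.le_sum_of_mem (List.mem_map.mpr ⟨av, hav, rfl⟩))
  by_cases hp : (0 : Int) < (((noe.filterMap id).map (pvCnt noe)).sum : Int)
  · simp only [gt_iff_lt, if_pos hp, true_iff]
    exact key.mp hp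
  · simp only [gt_iff_lt, if_neg hp, Bool.false_eq_true, false_iff]
    intro hP
    exact hp (key.mpr hP)

lemma go_iff (l : List (Option (List Int))) :
    ∀ (seen : PySem.Dict Int (List Int)) (pref : List (List Int)),
      (∀ v ∈ pref, seen.get? (pvKey v) = some v) →
      (∀ k v, seen.get? k = some v → v ∈ pref ∧ pvKey v = k) →
      (checkAltGo l seen = true ↔ pvPair (pref ++ l.filterMap id)) := by
  induction l with
  | nil =>
    intro seen pref h1 h2
    simp only [checkAltGo, List.filterMap_nil, List.append_nil, pvPair]
    constructor
    · intro h; exact absurd h (by simp)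
    · rintro ⟨a, ha, b, hb, hk, hne⟩
      have ha' := h1 a ha
      have hb' := h1 b hb
      rw [hk] at ha'
      rw [ha'] at hb'
      exact absurd (Option.some.inj hb') hne
  | cons h t ih =>
    intro seen pref h1 h2
    cases h with
    | none => simpa using ih seen pref h1 h2
    | some x =>
      rw [show List.filterMap id (some x :: t) = x :: List.filterMap id t from rfl]
      have hlist : pref ++ x :: List.filterMap id t = (pref ++ [x]) ++ List.filterMap id t := by
        simp
      rw [hlist]
      have hgoal : checkAltGo (some x :: t) seen = (match seen.get? (pvKey x) with
          | some y => if y ≠ x then true else checkAltGo t seen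
          | none => checkAltGo t (seen.insert (pvKey x) x)) := rfl
      rw [hgoal]
      cases hx : seen.get? (pvKey x) with
      | some y =>
        rw [show (match some y with
          | some y => if y ≠ x then true else checkAltGo t seen
          | none => checkAltGo t (seen.insert (pvKey x) x)) = (if y ≠ x then true else checkAltGo t seen) from rfl]
        by_cases hyx : y = x
        · subst hyx
          rw [if_neg (by simp)]
          apply ih seen (pref ++ [y])
          · intro v hv
            rcases List.mem_append.mp hv with hv | hv
            · exact h1 v hv
            · simp at hv; subst hv; exact hx
          · intro k v hkv
            obtain ⟨hm, hk⟩ := h2 k v hkv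
            exact ⟨List.mem_append.mpr (Or.inl hm), hk⟩
        · rw [if_pos hyx]
          simp only [true_iff, pvPair]
          obtain ⟨hy, hyk⟩ := h2 _ _ hx
          exact ⟨y, by simp [hy], x, by simp, by rw [hyk], hyx⟩
      | none =>
        rw [show (match (none : Option (List Int)) with
          | some y => if y ≠ x then true else checkAltGo t seen
          | none => checkAltGo t (seen.insert (pvKey x) x)) = checkAltGo t (seen.insert (pvKey x) x) from rfl]
        apply ih (seen.insert (pvKey x) x) (pref ++ [x])
        · intro v hv
          rcases List.mem_append.mp hv with hv | hv
          · have hne : pvKey v ≠ pvKey x := by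
              intro he
              have hv1 := h1 v hv
              rw [he, hx] at hv1
              simp at hv1
            rw [PySem.Dict.get?_insert_of_ne _ _ hne]
            exact h1 v hv
          · simp at hv; subst hv
            exact PySem.Dict.get?_insert_self _ _ _
        · intro k v hkv
          rw [PySem.Dict.get?_insert] at hkv
          split_ifs at hkv with hkk
          · cases Option.some.inj hkv
            exact ⟨by simp, hkk.symm⟩
          · obtain ⟨hm, hk⟩ := h2 k v hkv
            exact ⟨List.mem_append.mpr (Or.inl hm), hk⟩

lemma check_alt_iff (noe : List (Option (List Int))) :
    check_alt noe = true ↔ pvPair (noe.filterMap id) := by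
  unfold check_alt
  have h := go_iff noe PySem.Dict.empty []
    (by intro v hv; simp at hv)
    (by intro k v hkv; rw [PySem.Dict.get?_empty] at hkv; exact absurd hkv (by simp))
  simpa using h

-- ===== VERDICT (by name: the statement is the Claim_ definition above) =====
theorem check_spec : Claim_equal_check := by
  intro noe _ _
  unfold Spec_check
  rw [Bool.eq_iff_iff, check_iff, check_alt_iff]
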